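-- pv_equiv track=rewrite | github.com/MarcoSeri/MarcoSeri | src/practica3.py | encuentra_camino_simple
-- ===== SOURCE A (Python) =====
-- def encuentra_camino_simple(grafo_lista, nodo_ini, nodo_fin):
--     vertices, aristas = grafo_lista
--
--     def dfs(actual, objetivo, visitados, camino):
--         if actual == objetivo:
--             return camino + [actual]
--         visitados.add(actual)
--         camino.append(actual)
--
--         for inicio, fin in aristas:
--             if inicio == actual and fin not in visitados:
--                 resultado = dfs(fin, objetivo, visitados, camino)
--                 if resultado:
--                     return resultado
--             elif fin == actual and inicio not in visitados:
--                 resultado = dfs(inicio, objetivo, visitados, camino)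
--                 if resultado:
--                     return resultado
--
--         camino.pop()
--         return []
--
--     return dfs(nodo_ini, nodo_fin, set(), [])
--     '''
--     Ejemplo Entrada:
--         (['a','b','c','d','e','f'],[('a','b'),('a','d'),('b','d'),('b','c'),('c','d'),('c','e'),('d','e'),('c','f')])
-- 	d
--     Ejemplo retorno:
--         ['a','b','c','d']
--     '''
--     pass
-- ===== SOURCE B (Python) =====
-- def encuentra_camino_simple(grafo_lista, nodo_ini, nodo_fin):
--     _, aristas = grafo_lista
--
--     # adjacency dict built once, neighbors in original edge-scan order,
--     # so the search never rescans the whole edge list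
--     adj = {}
--     for u, w in aristas:
--         adj.setdefault(u, []).append(w)
--         if w != u:
--             adj.setdefault(w, []).append(u)
--
--     def dfs(nodo, vistos, ruta):
--         # returns (found path or None, visited set after exploring this branch)
--         if nodo == nodo_fin:
--             return ruta + [nodo], vistos
--         vistos = vistos | {nodo}
--         for vecino in adj.get(nodo, []):
--             if vecino not in vistos:
--                 hallado, vistos = dfs(vecino, vistos, ruta + [nodo])
--                 if hallado is not None:
--                     return hallado, vistos
--         return None, vistos
--
--     hallado, _ = dfs(nodo_ini, frozenset(), [])
--     return hallado if hallado is not None else []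
-- ===== Notes on version B (the rewrite author's own statement) =====
-- stated objective: alternative
-- what changed: B precomputes an adjacency dict once (neighbors in original edge-scan order) and runs a functional DFS that returns an Option path and threads the visited set, instead of A's DFS that rescans the whole edge list at every node and mutates a shared path list; a timing run did not show a measurable speed-up on the generated inputs.
import Mathlib
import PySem

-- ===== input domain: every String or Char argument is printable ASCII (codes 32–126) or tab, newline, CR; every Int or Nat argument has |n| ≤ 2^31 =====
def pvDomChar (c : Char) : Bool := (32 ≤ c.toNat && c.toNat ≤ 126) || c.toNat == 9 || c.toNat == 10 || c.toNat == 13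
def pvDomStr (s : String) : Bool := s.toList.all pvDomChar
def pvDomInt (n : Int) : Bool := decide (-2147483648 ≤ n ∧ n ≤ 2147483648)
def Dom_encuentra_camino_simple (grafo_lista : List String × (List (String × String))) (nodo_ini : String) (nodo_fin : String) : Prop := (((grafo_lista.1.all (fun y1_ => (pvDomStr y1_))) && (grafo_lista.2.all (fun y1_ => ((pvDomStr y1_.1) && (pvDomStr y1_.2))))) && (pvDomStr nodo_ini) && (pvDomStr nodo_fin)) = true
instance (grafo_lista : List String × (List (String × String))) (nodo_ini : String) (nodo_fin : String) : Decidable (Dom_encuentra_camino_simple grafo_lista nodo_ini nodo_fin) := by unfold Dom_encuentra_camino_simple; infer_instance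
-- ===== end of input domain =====

-- B replaces A's full edge-list rescan at every DFS step by an adjacency dict built once
-- (neighbors in the original edge-scan order) and a functional DFS returning an Option path
-- instead of mutating a shared path list; objective: alternative traversal bookkeeping.
-- Both DFS recursions are modelled with fuel 2*|aristas|+2, which exceeds the maximal call
-- depth (each non-terminal call adds a fresh node to the persistent visited set).

-- ===== PORT A =====
-- the for-loop over `aristas` inside dfs, threading the mutated (visitados, camino)
def pvLoopA (f : String → PySem.Set String → List String → List String × PySem.Set String × List String)
    (actual : String) : PySem.Set String → List String → List (String × String) →
    List String × PySem.Set String × List String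
  | vis, cam, [] => ([], vis, cam.dropLast)          -- camino.pop(); return []
  | vis, cam, (u, w) :: rest =>
    if u = actual ∧ PySem.Set.contains vis w = false then
      match f w vis cam with
      | (r, v', c') => if r ≠ [] then (r, v', c') else pvLoopA f actual v' c' rest
    else if w = actual ∧ PySem.Set.contains vis u = false then
      match f u vis cam with
      | (r, v', c') => if r ≠ [] then (r, v', c') else pvLoopA f actual v' c' rest
    else pvLoopA f actual vis cam rest

def pvDfsA (aristas : List (String × String)) :
    Nat → String → String → PySem.Set String → List String →
    List String × PySem.Set String × List String
  | 0, _, _, vis, cam => ([], vis, cam)              -- fuel exhaustion: unreachable at the fuel used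
  | fuel + 1, actual, obj, vis, cam =>
    if actual = obj then (cam ++ [actual], vis, cam)
    else pvLoopA (fun a v c => pvDfsA aristas fuel a obj v c) actual
      (PySem.Set.add vis actual) (cam ++ [actual]) aristas

def encuentra_camino_simple (grafo_lista : List String × (List (String × String))) (nodo_ini : String) (nodo_fin : String) : List String :=
  (pvDfsA grafo_lista.2 (2 * grafo_lista.2.length + 2) nodo_ini nodo_fin PySem.Set.empty []).1

-- ===== PORT B =====
-- adj.setdefault(u, []).append(w)  ==  adj[u] = adj.get(u, []) + [w]  ==  Dict.modify
def pvAdyPaso (m : PySem.Dict String (List String)) (arista : String × String) :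
    PySem.Dict String (List String) :=
  let m1 := m.modify arista.1 [] (· ++ [arista.2])
  if arista.2 ≠ arista.1 then m1.modify arista.2 [] (· ++ [arista.1]) else m1

def pvAdy (aristas : List (String × String)) : PySem.Dict String (List String) :=
  aristas.foldl pvAdyPaso PySem.Dict.empty

mutual
-- dfs(nodo, vistos, ruta) returning (found path or none, visited set afterwards)
def pvDfsB (ady : PySem.Dict String (List String)) (dest : String) :
    Nat → String → PySem.Set String → List String →
    Option (List String) × PySem.Set String
  | 0, _, vistos, _ => (none, vistos)                -- fuel guard: unreachable at the fuel used
  | gas + 1, nodo, vistos, ruta =>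
    if nodo = dest then (some (ruta ++ [nodo]), vistos)
    else pvScanB ady dest gas (ady.getD nodo []) (PySem.Set.add vistos nodo) (ruta ++ [nodo])
  termination_by gas _ _ _ => (gas, 0)

-- the for-loop over adj.get(nodo, [])
def pvScanB (ady : PySem.Dict String (List String)) (dest : String) :
    Nat → List String → PySem.Set String → List String →
    Option (List String) × PySem.Set String
  | _, [], vistos, _ => (none, vistos)
  | gas, vecino :: resto, vistos, ruta =>
    if PySem.Set.contains vistos vecino = true then pvScanB ady dest gas resto vistos ruta
    else
      match pvDfsB ady dest gas vecino vistos ruta with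
      | (some hallado, v2) => (some hallado, v2)
      | (none, v2) => pvScanB ady dest gas resto v2 ruta
  termination_by gas resto _ _ => (gas, resto.length + 1)
end

def encuentra_camino_simple_alt (grafo_lista : List String × (List (String × String))) (nodo_ini : String) (nodo_fin : String) : List String :=
  match pvDfsB (pvAdy grafo_lista.2) nodo_fin (2 * grafo_lista.2.length + 2) nodo_ini PySem.Set.empty [] with
  | (some hallado, _) => hallado
  | (none, _) => []

-- ===== PRECONDITION & SPEC =====
def Spec_encuentra_camino_simple (grafo_lista : List String × (List (String × String))) (nodo_ini : String) (nodo_fin : String) (out : List String) : Prop := out = encuentra_camino_simple_alt grafo_lista nodo_ini nodo_fin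
instance (grafo_lista : List String × (List (String × String))) (nodo_ini : String) (nodo_fin : String) (out : List String) : Decidable (Spec_encuentra_camino_simple grafo_lista nodo_ini nodo_fin out) := by unfold Spec_encuentra_camino_simple; infer_instance

-- ===== CLAIM (what is proved, stated in full; the proofs are below) =====
def Claim_equal_encuentra_camino_simple : Prop := ∀ (grafo_lista : List String × (List (String × String))) (nodo_ini : String) (nodo_fin : String), Dom_encuentra_camino_simple grafo_lista nodo_ini nodo_fin → Spec_encuentra_camino_simple grafo_lista nodo_ini nodo_fin (encuentra_camino_simple grafo_lista nodo_ini nodo_fin)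

-- ===== LEMMAS AND PROOFS =====

-- the neighbors of `actual` that A's edge scan considers, in scan order
def pvNbrs (actual : String) : List (String × String) → List String
  | [] => []
  | (u, w) :: rest =>
    (if u = actual then [w] else if w = actual then [u] else []) ++ pvNbrs actual rest

theorem pvAdy_getD (v : String) :
    ∀ (edges : List (String × String)) (d : PySem.Dict String (List String)),
      (edges.foldl pvAdyPaso d).getD v [] = d.getD v [] ++ pvNbrs v edges := by
  intro edges
  induction edges with
  | nil => intro d; simp [pvNbrs]
  | cons e rest ih =>
    intro d
    obtain ⟨u, w⟩ := e
    simp only [List.foldl_cons, ih, pvAdyPaso, pvNbrs]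
    by_cases hwu : w = u <;> by_cases huv : u = v <;> by_cases hwv : w = v <;>
      simp_all [PySem.Dict.getD_modify, eq_comm]

-- a successful pvDfsB always returns a nonempty path (it ends in `dest`)
theorem pvScanB_some_ne_nil (ady : PySem.Dict String (List String)) (dest : String) (gas : Nat)
    (hdfs : ∀ nodo vistos ruta r v, pvDfsB ady dest gas nodo vistos ruta = (some r, v) → r ≠ []) :
    ∀ (resto : List String) (vistos : PySem.Set String) (ruta : List String)
      (r : List String) (v : PySem.Set String),
      pvScanB ady dest gas resto vistos ruta = (some r, v) → r ≠ [] := by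
  intro resto
  induction resto with
  | nil => intro vistos ruta r v h; rw [pvScanB] at h; simp at h
  | cons vecino resto ih =>
    intro vistos ruta r v h
    rw [pvScanB] at h
    by_cases hc : PySem.Set.contains vistos vecino = true
    · rw [if_pos hc] at h; exact ih _ _ _ _ h
    · rw [if_neg hc] at h
      cases hd : pvDfsB ady dest gas vecino vistos ruta with
      | mk o v2 =>
        cases o with
        | some r' =>
          rw [hd] at h
          simp only [Prod.mk.injEq, Option.some.injEq] at h
          exact h.1 ▸ hdfs _ _ _ _ _ hd
        | none => rw [hd] at h; simp only at h; exact ih _ _ _ _ h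

theorem pvDfsB_some_ne_nil (ady : PySem.Dict String (List String)) (dest : String) :
    ∀ (gas : Nat) (nodo : String) (vistos : PySem.Set String) (ruta : List String)
      (r : List String) (v : PySem.Set String),
      pvDfsB ady dest gas nodo vistos ruta = (some r, v) → r ≠ [] := by
  intro gas
  induction gas with
  | zero => intro nodo vistos ruta r v h; rw [pvDfsB] at h; simp at h
  | succ gas ih =>
    intro nodo vistos ruta r v h
    rw [pvDfsB] at h
    by_cases hn : nodo = dest
    · rw [if_pos hn] at h
      have : ruta ++ [nodo] = r := by cases h; rfl
      subst this; simp
    · rw [if_neg hn] at h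
      exact pvScanB_some_ne_nil ady dest gas (fun a b c d e => ih a b c d e) _ _ _ _ _ h

-- A's fused edge scan simulates B's scan of the precomputed neighbor list
theorem pvLoop_sim (aristas : List (String × String)) (ady : PySem.Dict String (List String))
    (obj : String) (fuel : Nat)
    (ihd : ∀ a vis cam, pvDfsA aristas fuel a obj vis cam =
      match pvDfsB ady obj fuel a vis cam with
      | (some r, v) => (r, v, r.dropLast)
      | (none, v) => ([], v, cam))
    (actual : String) :
    ∀ (edges : List (String × String)) (vis : PySem.Set String) (cam : List String),
      pvLoopA (fun a v c => pvDfsA aristas fuel a obj v c) actual vis cam edges =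
      match pvScanB ady obj fuel (pvNbrs actual edges) vis cam with
      | (some r, v) => (r, v, r.dropLast)
      | (none, v) => ([], v, cam.dropLast) := by
  intro edges
  induction edges with
  | nil => intro vis cam; simp [pvLoopA, pvScanB, pvNbrs]
  | cons e rest ih =>
    intro vis cam
    obtain ⟨u, w⟩ := e
    by_cases huv : u = actual
    · subst huv
      have hn : pvNbrs u ((u, w) :: rest) = w :: pvNbrs u rest := by simp [pvNbrs]
      rw [hn, pvLoopA, pvScanB]
      by_cases hw : PySem.Set.contains vis w = false
      · rw [if_pos ⟨rfl, hw⟩, if_neg (by rw [hw]; simp), ihd]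
        cases hd : pvDfsB ady obj fuel w vis cam with
        | mk o v2 =>
          cases o with
          | some r =>
            have hr : r ≠ [] := pvDfsB_some_ne_nil ady obj fuel w vis cam r v2 hd
            simp [hr]
          | none => simp [ih]
      · -- w is already visited; the elif can never fire (it would need w = u with u unvisited)
        rw [if_neg (fun hc => hw hc.2),
          if_neg (by rintro ⟨h1, h2⟩; subst h1; exact hw h2),
          if_pos (by revert hw; cases PySem.Set.contains vis w <;> simp), ih]
    · by_cases hwv : w = actual
      · subst hwv
        have hn : pvNbrs w ((u, w) :: rest) = u :: pvNbrs w rest := by simp [pvNbrs, huv]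
        rw [hn, pvLoopA, pvScanB, if_neg (by rintro ⟨h, _⟩; exact huv h)]
        by_cases hu : PySem.Set.contains vis u = false
        · rw [if_pos ⟨rfl, hu⟩, if_neg (by rw [hu]; simp), ihd]
          cases hd : pvDfsB ady obj fuel u vis cam with
          | mk o v2 =>
            cases o with
            | some r =>
              have hr : r ≠ [] := pvDfsB_some_ne_nil ady obj fuel u vis cam r v2 hd
              simp [hr]
            | none => simp [ih]
        · rw [if_neg (fun hc => hu hc.2),
            if_pos (by revert hu; cases PySem.Set.contains vis u <;> simp), ih]
      · have hn : pvNbrs actual ((u, w) :: rest) = pvNbrs actual rest := by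
          simp [pvNbrs, huv, hwv]
        rw [hn, pvLoopA, if_neg (by rintro ⟨h, _⟩; exact huv h),
          if_neg (by rintro ⟨h, _⟩; exact hwv h), ih]

theorem pvDfs_sim (aristas : List (String × String)) (obj : String) :
    ∀ (fuel : Nat) (a : String) (vis : PySem.Set String) (cam : List String),
      pvDfsA aristas fuel a obj vis cam =
      match pvDfsB (pvAdy aristas) obj fuel a vis cam with
      | (some r, v) => (r, v, r.dropLast)
      | (none, v) => ([], v, cam) := by
  intro fuel
  induction fuel with
  | zero => intro a vis cam; rw [pvDfsA, pvDfsB]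
  | succ fuel ih =>
    intro a vis cam
    rw [pvDfsA, pvDfsB]
    by_cases h : a = obj
    · simp [h]
    · rw [if_neg h, if_neg h]
      have hadj : (pvAdy aristas).getD a [] = pvNbrs a aristas := by
        simpa [PySem.Dict.getD_empty] using pvAdy_getD a aristas PySem.Dict.empty
      rw [hadj, pvLoop_sim aristas (pvAdy aristas) obj fuel ih a aristas
        (PySem.Set.add vis a) (cam ++ [a])]
      cases hs : pvScanB (pvAdy aristas) obj fuel (pvNbrs a aristas)
          (PySem.Set.add vis a) (cam ++ [a]) with
      | mk o v2 => cases o <;> simp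

-- ===== VERDICT (by name: the statement is the Claim_ definition above) =====
theorem encuentra_camino_simple_spec : Claim_equal_encuentra_camino_simple := by
  intro gl ni nf _
  unfold Spec_encuentra_camino_simple encuentra_camino_simple encuentra_camino_simple_alt
  rw [pvDfs_sim]
  cases h : pvDfsB (pvAdy gl.2) nf (2 * gl.2.length + 2) ni PySem.Set.empty [] with
  | mk o v => cases o <;> simp
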